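-- pv_equiv track=rewrite | github.com/pawgajda/codewars-solutions | python/linux_history_and_exclamation_mark_command_series5.py | bang_contain_string
-- ===== SOURCE A (Python) =====
-- def bang_contain_string(s,history):
--     hist = history.split("\n")
--     hist = [i.strip() for i in hist]
--     # remove numbers from hist entries
--     hist = [" ".join(i.split()[1:]) for i in hist]
--     # reverse the list because we look for most recent command
--     hist = list(reversed(hist))
--
--     for entry in hist:
--         if s in entry:
--             # parse found entry
--             return entry
--
--     return f"!{s}: event not found"
-- ===== SOURCE B (Python) =====
-- def bang_contain_string(s, history):
--     def match_of(line):
--         cmd = " ".join(line.strip().split()[1:])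
--         return cmd if s in cmd else None
--
--     def last_match(ls):
--         # divide and conquer, preferring the later (more recent) half's match;
--         # recursion depth is O(log n)
--         if len(ls) == 1:
--             return match_of(ls[0])
--         mid = len(ls) // 2
--         r = last_match(ls[mid:])
--         return r if r is not None else last_match(ls[:mid])
--
--     r = last_match(history.split("\n"))  # split always yields a nonempty list
--     return f"!{s}: event not found" if r is None else r
-- ===== Notes on version B (the rewrite author's own statement) =====
-- stated objective: alternative
-- what changed: Replaces A's build-three-lists/reverse/linear-first-match with a divide-and-conquer recursion that searches the later half of the lines first and falls back to the earlier half, returning the most recent matching command without reversing or any linear scan loop.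
import Mathlib
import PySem

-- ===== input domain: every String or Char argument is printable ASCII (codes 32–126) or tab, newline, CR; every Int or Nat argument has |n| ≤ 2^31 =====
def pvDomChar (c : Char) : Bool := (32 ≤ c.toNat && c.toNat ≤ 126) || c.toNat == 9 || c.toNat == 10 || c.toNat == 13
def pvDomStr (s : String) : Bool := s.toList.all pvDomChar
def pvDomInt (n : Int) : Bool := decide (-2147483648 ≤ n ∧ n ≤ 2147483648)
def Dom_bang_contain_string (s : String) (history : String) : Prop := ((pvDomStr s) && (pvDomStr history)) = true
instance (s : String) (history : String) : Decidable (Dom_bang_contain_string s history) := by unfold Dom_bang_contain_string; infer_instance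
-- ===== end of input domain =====

-- B replaces A's build-lists/reverse/linear-first-match with a divide-and-conquer search
-- (recurse on the later half first, fall back to the earlier half); same value, no speed claim.

-- ===== PORT A =====
-- the for-loop of A: return the first entry containing s, else the sentinel
def pvLoopA (s : String) : List String → String
  | [] => "!" ++ s ++ ": event not found"
  | e :: t => if PySem.Str.isIn s e then e else pvLoopA s t

def bang_contain_string (s : String) (history : String) : String :=
  let hist := (PySem.Str.split? history "\n").getD []  -- sep "\n" ≠ "", so split? is some
  let hist := hist.map (fun i => PySem.Str.strip i)
  let hist := hist.map (fun i => PySem.Str.join " " ((PySem.Str.split₀ i).drop 1))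
  let hist := hist.reverse
  pvLoopA s hist

-- ===== PORT B =====
-- B's match_of: the processed command of one line, if it contains s
def pvMatchOf (s line : String) : Option String :=
  let cmd := PySem.Str.join " " ((PySem.Str.split₀ (PySem.Str.strip line)).drop 1)
  if PySem.Str.isIn s cmd then some cmd else none

-- B's last_match: divide and conquer, preferring the later half's match.
-- The [] case is unreachable in B (split yields a nonempty list and both halves are nonempty).
def pvLastMatch (s : String) (ls : List String) : Option String :=
  match ls with
  | [] => none
  | [x] => pvMatchOf s x
  | x :: y :: t =>
    let mid := (x :: y :: t).length / 2
    match pvLastMatch s ((x :: y :: t).drop mid) with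
    | some r => some r
    | none => pvLastMatch s ((x :: y :: t).take mid)
termination_by ls.length
decreasing_by
  · simp only [List.length_drop, List.length_cons]; omega
  · simp only [List.length_take, List.length_cons]; omega

def bang_contain_string_alt (s : String) (history : String) : String :=
  let lines := (PySem.Str.split? history "\n").getD []  -- sep "\n" ≠ "", so split? is some
  match pvLastMatch s lines with
  | some r => r
  | none => "!" ++ s ++ ": event not found"

-- ===== PRECONDITION & SPEC =====
def Spec_bang_contain_string (s : String) (history : String) (out : String) : Prop := out = bang_contain_string_alt s history
instance (s : String) (history : String) (out : String) : Decidable (Spec_bang_contain_string s history out) := by unfold Spec_bang_contain_string; infer_instance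

-- ===== CLAIM (what is proved, stated in full; the proofs are below) =====
def Claim_equal_bang_contain_string : Prop := ∀ (s : String) (history : String), Dom_bang_contain_string s history → Spec_bang_contain_string s history (bang_contain_string s history)

-- ===== LEMMAS AND PROOFS =====
-- first match of a processed-entry list, as an Option
def pvFindOpt (s : String) : List String → Option String
  | [] => none
  | e :: t => if PySem.Str.isIn s e then some e else pvFindOpt s t

-- A's per-line processing
def pvProc (i : String) : String :=
  PySem.Str.join " " ((PySem.Str.split₀ (PySem.Str.strip i)).drop 1)

theorem pvLoopA_eq (s : String) (l : List String) :
    pvLoopA s l = (pvFindOpt s l).getD ("!" ++ s ++ ": event not found") := by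
  induction l with
  | nil => rfl
  | cons e t ih =>
    simp only [pvLoopA, pvFindOpt, ih]
    split <;> simp

theorem pvFindOpt_append (s : String) (xs ys : List String) :
    pvFindOpt s (xs ++ ys) =
      (match pvFindOpt s xs with | some r => some r | none => pvFindOpt s ys) := by
  induction xs with
  | nil => rfl
  | cons e t ih =>
    simp only [List.cons_append, pvFindOpt, ih]
    split <;> simp

-- divide-and-conquer last match = first match of the reversed processed list
theorem pvLastMatch_eq (s : String) (ls : List String) :
    pvLastMatch s ls = pvFindOpt s ((ls.map pvProc).reverse) := by
  induction ls using pvLastMatch.induct s with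
  | case1 => simp [pvLastMatch, pvFindOpt]
  | case2 x => simp [pvLastMatch, pvMatchOf, pvFindOpt, pvProc]
  | case3 x y t mid r hr ihd =>
    rw [pvLastMatch, hr]
    have hsplit : (x :: y :: t) =
        (x :: y :: t).take ((x :: y :: t).length / 2) ++
        (x :: y :: t).drop ((x :: y :: t).length / 2) := (List.take_append_drop _ _).symm
    conv_rhs => rw [hsplit]
    rw [List.map_append, List.reverse_append, pvFindOpt_append, ← ihd, hr]
  | case4 x y t mid hr ihd iht =>
    rw [pvLastMatch, hr]
    have hsplit : (x :: y :: t) =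
        (x :: y :: t).take ((x :: y :: t).length / 2) ++
        (x :: y :: t).drop ((x :: y :: t).length / 2) := (List.take_append_drop _ _).symm
    conv_rhs => rw [hsplit]
    rw [List.map_append, List.reverse_append, pvFindOpt_append, ← ihd, hr, ← iht]

-- ===== VERDICT (by name: the statement is the Claim_ definition above) =====
theorem bang_contain_string_spec : Claim_equal_bang_contain_string := by
  intro s history _
  unfold Spec_bang_contain_string bang_contain_string bang_contain_string_alt
  simp only [List.map_map, pvLoopA_eq]
  rw [show ((fun i => PySem.Str.join " " ((PySem.Str.split₀ i).drop 1)) ∘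
        fun i => PySem.Str.strip i) = pvProc from rfl, ← pvLastMatch_eq]
  cases pvLastMatch s ((PySem.Str.split? history "\n").getD []) <;> simp
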